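-- pv_equiv track=rewrite | github.com/Lockdndream/dita-converter | agents/generator.py | _split_into_topics
-- ===== SOURCE A (Python) =====
-- def _split_into_topics(blocks: list[dict]) -> list[list[dict]]:
--     """
--     Split the block list at every `section_title` element.
--     The first chunk contains everything up to the first section_title.
--     Each subsequent chunk starts with the section_title block (re-typed
--     as `title` for its own topic).
--     """
--     if not blocks:
--         return [[]]
--
--     chunks: list[list[dict]] = []
--     current: list[dict] = []
--
--     for block in blocks:
--         if block.get("dita_element") == "section_title" and current:
--             # Close current chunk, start new one
--             chunks.append(current)
--             # Promote section_title → title for the new topic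
--             new_block = dict(block)
--             new_block["dita_element"] = "title"
--             current = [new_block]
--         else:
--             current.append(block)
--
--     if current:
--         chunks.append(current)
--
--     # Filter out empty/title-only chunks
--     return [c for c in chunks if any(
--         b.get("dita_element") not in (None, "dropped") for b in c
--     )]
-- ===== SOURCE B (Python) =====
-- def _split_into_topics(blocks: list[dict]) -> list[list[dict]]:
--     """Recursive span-based segmentation: each call takes the run of
--     non-section_title blocks as one chunk, then recurses on the rest
--     with the cut block promoted to a 'title' head."""
--     if not blocks:
--         return [[]]
--
--     def segments(head, rest):
--         for i, b in enumerate(rest):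
--             if b.get("dita_element") == "section_title":
--                 promoted = dict(b)
--                 promoted["dita_element"] = "title"
--                 return [head + rest[:i]] + segments([promoted], rest[i + 1:])
--         return [head + rest]
--
--     return [c for c in segments([blocks[0]], blocks[1:])
--             if any(b.get("dita_element") not in (None, "dropped") for b in c)]
-- ===== Notes on version B (the rewrite author's own statement) =====
-- stated objective: alternative
-- what changed: Replaces A's single pass with chunks/current accumulators and a trailing flush by a recursive segmentation that spans to the next section_title, emits the chunk, and recurses on the remainder with the promoted title head.
import Mathlib
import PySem

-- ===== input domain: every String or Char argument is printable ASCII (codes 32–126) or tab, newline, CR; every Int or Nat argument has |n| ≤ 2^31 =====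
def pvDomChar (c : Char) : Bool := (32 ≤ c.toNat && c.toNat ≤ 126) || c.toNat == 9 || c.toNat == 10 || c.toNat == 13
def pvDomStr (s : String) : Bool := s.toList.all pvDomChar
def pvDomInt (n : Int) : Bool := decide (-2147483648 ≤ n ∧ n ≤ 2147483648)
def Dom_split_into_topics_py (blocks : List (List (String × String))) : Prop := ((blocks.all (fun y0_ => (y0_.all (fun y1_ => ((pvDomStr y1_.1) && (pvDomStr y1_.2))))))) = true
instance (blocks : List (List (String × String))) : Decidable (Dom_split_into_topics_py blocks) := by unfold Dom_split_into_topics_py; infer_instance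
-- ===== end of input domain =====

-- B replaces A's one-pass accumulator loop (with trailing flush) by a recursive
-- span-based segmentation; same cost, different decomposition (objective: alternative).

-- shared Python-dict primitives (the same expressions occur in A and B)
def pvGetDE (b : List (String × String)) : Option String :=
  (PySem.Dict.mk b).get? "dita_element"

def pvPromote (b : List (String × String)) : List (String × String) :=
  ((PySem.Dict.mk b).insert "dita_element" "title").items

def pvKeep (c : List (List (String × String))) : Bool :=
  c.any (fun b => !(pvGetDE b == none || pvGetDE b == some "dropped"))

-- ===== PORT A =====
def pvLoopA : List (List (String × String)) → List (List (List (String × String))) →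
    List (List (String × String)) →
    List (List (List (String × String))) × List (List (String × String))
  | [], chunks, current => (chunks, current)
  | b :: rest, chunks, current =>
    if (pvGetDE b == some "section_title") && !current.isEmpty then
      pvLoopA rest (chunks ++ [current]) [pvPromote b]
    else
      pvLoopA rest chunks (current ++ [b])

def split_into_topics_py (blocks : List (List (String × String))) :
    List (List (List (String × String))) :=
  if blocks.isEmpty then [[]]
  else
    let p := pvLoopA blocks [] []
    let chunks := if p.2.isEmpty then p.1 else p.1 ++ [p.2]
    chunks.filter pvKeep

-- ===== PORT B =====
-- the enumerate loop of Source B's `segments`: the run of blocks before the first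
-- section_title is rest.takeWhile, the cut block and remainder are rest.dropWhile;
-- the Nat fuel (called with rest.length) is only a totality device for the recursion
def pvSegsBF : Nat → List (List (String × String)) → List (List (String × String)) →
    List (List (List (String × String)))
  | 0, head, rest => [head ++ rest]
  | fuel + 1, head, rest =>
    match rest.dropWhile (fun b => !(pvGetDE b == some "section_title")) with
    | [] => [head ++ rest]
    | c :: rest' =>
      (head ++ rest.takeWhile (fun b => !(pvGetDE b == some "section_title"))) ::
        pvSegsBF fuel [pvPromote c] rest'

def pvSegsB (head : List (List (String × String))) (rest : List (List (String × String))) :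
    List (List (List (String × String))) :=
  pvSegsBF rest.length head rest

def split_into_topics_py_alt (blocks : List (List (String × String))) :
    List (List (List (String × String))) :=
  match blocks with
  | [] => [[]]
  | b :: bs => (pvSegsB [b] bs).filter pvKeep

-- ===== PRECONDITION & SPEC =====
def Spec_split_into_topics_py (blocks : List (List (String × String))) (out : List (List (List (String × String)))) : Prop := out = split_into_topics_py_alt blocks
instance (blocks : List (List (String × String))) (out : List (List (List (String × String)))) : Decidable (Spec_split_into_topics_py blocks out) := by unfold Spec_split_into_topics_py; infer_instance

-- ===== CLAIM (what is proved, stated in full; the proofs are below) =====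
def Claim_equal_split_into_topics_py : Prop := ∀ (blocks : List (List (String × String))), Dom_split_into_topics_py blocks → Spec_split_into_topics_py blocks (split_into_topics_py blocks)

-- ===== LEMMAS AND PROOFS =====

theorem pvSegsBF_irrel (f1 : Nat) : ∀ (f2 : Nat) (head rest : List (List (String × String))),
    rest.length ≤ f1 → rest.length ≤ f2 → pvSegsBF f1 head rest = pvSegsBF f2 head rest := by
  induction f1 with
  | zero =>
    intro f2 head rest h1 h2
    have : rest = [] := List.length_eq_zero_iff.mp (Nat.le_zero.mp h1)
    subst this
    cases f2 <;> simp [pvSegsBF, List.dropWhile]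
  | succ f1 ih =>
    intro f2 head rest h1 h2
    cases f2 with
    | zero =>
      have : rest = [] := List.length_eq_zero_iff.mp (Nat.le_zero.mp h2)
      subst this
      simp [pvSegsBF, List.dropWhile]
    | succ f2 =>
      simp only [pvSegsBF]
      cases hd : rest.dropWhile (fun b => !(pvGetDE b == some "section_title")) with
      | nil => rfl
      | cons c rest' =>
        have hlen : rest'.length + 1 ≤ rest.length := by
          have := List.length_dropWhile_le (fun b => !(pvGetDE b == some "section_title")) rest
          rw [hd] at this
          simpa using this
        simp only []
        rw [ih f2 [pvPromote c] rest' (by omega) (by omega)]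

theorem pvSegsBF_eq (fuel : Nat) (head rest : List (List (String × String)))
    (hf : rest.length ≤ fuel) :
    pvSegsBF fuel head rest =
      match rest.dropWhile (fun b => !(pvGetDE b == some "section_title")) with
      | [] => [head ++ rest]
      | c :: rest' =>
        (head ++ rest.takeWhile (fun b => !(pvGetDE b == some "section_title"))) ::
          pvSegsBF rest'.length [pvPromote c] rest' := by
  cases fuel with
  | zero =>
    have : rest = [] := List.length_eq_zero_iff.mp (Nat.le_zero.mp hf)
    subst this
    simp [pvSegsBF, List.dropWhile]
  | succ f =>
    simp only [pvSegsBF]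
    cases hd : rest.dropWhile (fun b => !(pvGetDE b == some "section_title")) with
    | nil => rfl
    | cons c rest' =>
      have hlen : rest'.length + 1 ≤ rest.length := by
        have := List.length_dropWhile_le (fun b => !(pvGetDE b == some "section_title")) rest
        rw [hd] at this
        simpa using this
      simp only []
      rw [pvSegsBF_irrel f rest'.length [pvPromote c] rest' (by omega) (by omega)]

theorem pvSegsB_nil (head : List (List (String × String))) : pvSegsB head [] = [head] := by
  simp [pvSegsB, pvSegsBF]

theorem pvSegsB_cons_cut (head : List (List (String × String))) (b : List (String × String))
    (rest : List (List (String × String)))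
    (h : (pvGetDE b == some "section_title") = true) :
    pvSegsB head (b :: rest) = head :: pvSegsB [pvPromote b] rest := by
  rw [pvSegsB, pvSegsBF_eq _ _ _ le_rfl]
  simp [h, pvSegsB]

theorem pvSegsB_cons_not_cut (head : List (List (String × String))) (b : List (String × String))
    (rest : List (List (String × String)))
    (h : (pvGetDE b == some "section_title") = false) :
    pvSegsB head (b :: rest) = pvSegsB (head ++ [b]) rest := by
  rw [pvSegsB, pvSegsBF_eq _ _ _ le_rfl, pvSegsB, pvSegsBF_eq _ _ _ le_rfl]
  simp only [List.dropWhile_cons, List.takeWhile_cons, h, Bool.not_false]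
  cases hd : rest.dropWhile (fun b => !(pvGetDE b == some "section_title")) with
  | nil => simp
  | cons c rest' => simp

theorem pvLoopA_eq (l : List (List (String × String)))
    (chunks : List (List (List (String × String))))
    (current : List (List (String × String))) (hc : current ≠ []) :
    (if (pvLoopA l chunks current).2.isEmpty then (pvLoopA l chunks current).1
     else (pvLoopA l chunks current).1 ++ [(pvLoopA l chunks current).2]) =
    chunks ++ pvSegsB current l := by
  induction l generalizing chunks current with
  | nil =>
    rw [pvSegsB_nil]
    simp [pvLoopA, hc]
  | cons b rest ih =>
    by_cases hcut : (pvGetDE b == some "section_title") = true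
    · have hne : current.isEmpty = false := by simpa using hc
      rw [show pvLoopA (b :: rest) chunks current =
          pvLoopA rest (chunks ++ [current]) [pvPromote b] from by
        simp [pvLoopA, hcut, hne]]
      rw [ih (chunks ++ [current]) [pvPromote b] (by simp)]
      rw [pvSegsB_cons_cut _ _ _ hcut]
      simp
    · have hcut' : (pvGetDE b == some "section_title") = false := by simpa using hcut
      rw [show pvLoopA (b :: rest) chunks current =
          pvLoopA rest chunks (current ++ [b]) from by
        simp [pvLoopA, hcut']]
      rw [ih chunks (current ++ [b]) (by simp)]
      rw [pvSegsB_cons_not_cut _ _ _ hcut']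

-- ===== VERDICT (by name: the statement is the Claim_ definition above) =====
theorem split_into_topics_py_spec : Claim_equal_split_into_topics_py := by
  intro blocks _
  unfold Spec_split_into_topics_py split_into_topics_py split_into_topics_py_alt
  cases blocks with
  | nil => simp
  | cons b bs =>
    have h1 : pvLoopA (b :: bs) [] [] = pvLoopA bs [] [b] := by
      simp [pvLoopA]
    have h2 := pvLoopA_eq bs [] [b] (by simp)
    simp only [List.isEmpty_cons, Bool.false_eq_true, if_false, h1]
    rw [h2]
    simp
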